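-- pv_equiv track=rewrite | github.com/cvvcvccvvcvc/gaph | analysis/compare_runs_on_csv.py | _classify_terms
-- ===== SOURCE A (Python) =====
-- IMPACT_RANK = {"MODIFIER": 0, "LOW": 1, "MODERATE": 2, "HIGH": 3, "OTHER": -1}
--
-- TERM_TO_IMPACT = {
--     "frameshift_variant": "HIGH",
--     "stop_gained": "HIGH",
--     "stop_lost": "HIGH",
--     "start_lost": "HIGH",
--     "splice_acceptor_variant": "HIGH",
--     "splice_donor_variant": "HIGH",
--     "missense_variant": "MODERATE",
--     "inframe_insertion": "MODERATE",
--     "inframe_deletion": "MODERATE",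
--     "protein_altering_variant": "MODERATE",
--     "splice_region_variant": "MODERATE",
--     "synonymous_variant": "LOW",
--     "intron_variant": "MODIFIER",
--     "5_prime_utr_variant": "MODIFIER",
--     "3_prime_utr_variant": "MODIFIER",
--     "upstream_gene_variant": "MODIFIER",
--     "downstream_gene_variant": "MODIFIER",
--     "intergenic_variant": "MODIFIER",
--     "regulatory_region_variant": "MODIFIER",
--     "non_coding_transcript_variant": "MODIFIER",
--     "coding_sequence_variant": "MODIFIER",
--     "mature_mirna_variant": "MODIFIER",
-- }
--
-- def _classify_terms(terms: list[str]) -> str | None: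
--     if not terms:
--         return None
--     best = "OTHER"
--     best_rank = IMPACT_RANK[best]
--     for term in terms:
--         impact = TERM_TO_IMPACT.get(term, "OTHER")
--         rank = IMPACT_RANK[impact]
--         if rank > best_rank:
--             best = impact
--             best_rank = rank
--     return best
-- ===== SOURCE B (Python) =====
-- _LEVEL_TERMS = {
--     "HIGH": {"frameshift_variant", "stop_gained", "stop_lost", "start_lost",
--              "splice_acceptor_variant", "splice_donor_variant"},
--     "MODERATE": {"missense_variant", "inframe_insertion", "inframe_deletion",
--                  "protein_altering_variant", "splice_region_variant"},
--     "LOW": {"synonymous_variant"},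
--     "MODIFIER": {"intron_variant", "5_prime_utr_variant", "3_prime_utr_variant",
--                  "upstream_gene_variant", "downstream_gene_variant", "intergenic_variant",
--                  "regulatory_region_variant", "non_coding_transcript_variant",
--                  "coding_sequence_variant", "mature_mirna_variant"},
-- }
--
-- def _classify_terms(terms: list[str]) -> str | None:
--     if not terms:
--         return None
--     s = set(terms)
--     for level in ("HIGH", "MODERATE", "LOW", "MODIFIER"):
--         if not s.isdisjoint(_LEVEL_TERMS[level]):
--             return level
--     return "OTHER"
-- ===== Notes on version B (the rewrite author's own statement) =====
-- stated objective: alternative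
-- what changed: Replaces A's single running-max scan (tracking best impact and its rank per term) with a priority-ordered search: build a set of the input terms once, then test the impact levels in descending order (HIGH, MODERATE, LOW, MODIFIER) and return the first level whose precomputed term set intersects the input, defaulting to OTHER.
import Mathlib
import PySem

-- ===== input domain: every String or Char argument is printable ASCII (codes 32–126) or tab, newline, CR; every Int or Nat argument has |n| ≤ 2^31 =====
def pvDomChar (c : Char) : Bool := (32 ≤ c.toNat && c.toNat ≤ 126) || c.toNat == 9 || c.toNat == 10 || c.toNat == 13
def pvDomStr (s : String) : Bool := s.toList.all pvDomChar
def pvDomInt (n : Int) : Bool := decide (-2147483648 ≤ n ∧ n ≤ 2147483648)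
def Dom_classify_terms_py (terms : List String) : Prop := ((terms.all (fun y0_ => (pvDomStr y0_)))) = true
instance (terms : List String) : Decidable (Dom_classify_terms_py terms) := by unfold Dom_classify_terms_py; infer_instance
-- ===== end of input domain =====

-- B replaces A's running-max scan over ranks with a priority-ordered search: one set of the
-- input terms, then the impact levels tried in descending order, returning the first level
-- whose term set meets the input (objective: alternative decomposition, same cost).


-- ===== PORT A =====
def IMPACT_RANK : PySem.Dict String Int :=
  PySem.Dict.ofList [("MODIFIER", 0), ("LOW", 1), ("MODERATE", 2), ("HIGH", 3), ("OTHER", -1)]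

def TERM_TO_IMPACT : PySem.Dict String String :=
  PySem.Dict.ofList [
    ("frameshift_variant", "HIGH"), ("stop_gained", "HIGH"), ("stop_lost", "HIGH"),
    ("start_lost", "HIGH"), ("splice_acceptor_variant", "HIGH"), ("splice_donor_variant", "HIGH"),
    ("missense_variant", "MODERATE"), ("inframe_insertion", "MODERATE"), ("inframe_deletion", "MODERATE"),
    ("protein_altering_variant", "MODERATE"), ("splice_region_variant", "MODERATE"),
    ("synonymous_variant", "LOW"), ("intron_variant", "MODIFIER"), ("5_prime_utr_variant", "MODIFIER"),
    ("3_prime_utr_variant", "MODIFIER"), ("upstream_gene_variant", "MODIFIER"),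
    ("downstream_gene_variant", "MODIFIER"), ("intergenic_variant", "MODIFIER"),
    ("regulatory_region_variant", "MODIFIER"), ("non_coding_transcript_variant", "MODIFIER"),
    ("coding_sequence_variant", "MODIFIER"), ("mature_mirna_variant", "MODIFIER")]

-- Python's IMPACT_RANK[impact]: the looked-up key is always a value of TERM_TO_IMPACT or "OTHER",
-- all of which are keys of IMPACT_RANK, so d[impact] never raises; ported as getD (default unreachable).
def classify_terms_py (terms : List String) : Option String :=
  if terms = [] then none
  else
    let best := "OTHER"
    let best_rank := IMPACT_RANK.getD best 0
    let st := terms.foldl (fun (st : String × Int) term =>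
      let impact := TERM_TO_IMPACT.getD term "OTHER"
      let rank := IMPACT_RANK.getD impact 0
      if rank > st.2 then (impact, rank) else st) (best, best_rank)
    some st.1

-- ===== PORT B =====
def LEVEL_TERMS (level : String) : PySem.Set String :=
  if level = "HIGH" then
    PySem.Set.ofList ["frameshift_variant", "stop_gained", "stop_lost", "start_lost",
      "splice_acceptor_variant", "splice_donor_variant"]
  else if level = "MODERATE" then
    PySem.Set.ofList ["missense_variant", "inframe_insertion", "inframe_deletion",
      "protein_altering_variant", "splice_region_variant"]
  else if level = "LOW" then
    PySem.Set.ofList ["synonymous_variant"]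
  else
    PySem.Set.ofList ["intron_variant", "5_prime_utr_variant", "3_prime_utr_variant",
      "upstream_gene_variant", "downstream_gene_variant", "intergenic_variant",
      "regulatory_region_variant", "non_coding_transcript_variant",
      "coding_sequence_variant", "mature_mirna_variant"]

def levelLoop (s : PySem.Set String) : List String → String
  | [] => "OTHER"
  | level :: rest =>
    if ¬ PySem.Set.isdisjoint s (LEVEL_TERMS level) then level else levelLoop s rest

def classify_terms_py_alt (terms : List String) : Option String :=
  if terms = [] then none
  else
    let s := PySem.Set.ofList terms
    some (levelLoop s ["HIGH", "MODERATE", "LOW", "MODIFIER"])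

-- ===== PRECONDITION & SPEC =====
def Spec_classify_terms_py (terms : List String) (out : Option String) : Prop := out = classify_terms_py_alt terms
instance (terms : List String) (out : Option String) : Decidable (Spec_classify_terms_py terms out) := by unfold Spec_classify_terms_py; infer_instance

-- ===== CLAIM (what is proved, stated in full; the proofs are below) =====
def Claim_equal_classify_terms_py : Prop := ∀ (terms : List String), Dom_classify_terms_py terms → Spec_classify_terms_py terms (classify_terms_py terms)

-- ===== LEMMAS AND PROOFS =====

def impactOf (t : String) : String := TERM_TO_IMPACT.getD t "OTHER"
def rk (s : String) : Int := IMPACT_RANK.getD s 0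
def invR (r : Int) : String :=
  if r = 3 then "HIGH" else if r = 2 then "MODERATE" else if r = 1 then "LOW"
  else if r = 0 then "MODIFIER" else "OTHER"
def runMax (ts : List String) (r0 : Int) : Int :=
  ts.foldl (fun r t => max r (rk (impactOf t))) r0
def Five (b : String) : Prop :=
  b = "HIGH" ∨ b = "MODERATE" ∨ b = "LOW" ∨ b = "MODIFIER" ∨ b = "OTHER"

lemma TTI_items : TERM_TO_IMPACT.items = [
    ("frameshift_variant", "HIGH"), ("stop_gained", "HIGH"), ("stop_lost", "HIGH"),
    ("start_lost", "HIGH"), ("splice_acceptor_variant", "HIGH"), ("splice_donor_variant", "HIGH"),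
    ("missense_variant", "MODERATE"), ("inframe_insertion", "MODERATE"), ("inframe_deletion", "MODERATE"),
    ("protein_altering_variant", "MODERATE"), ("splice_region_variant", "MODERATE"),
    ("synonymous_variant", "LOW"), ("intron_variant", "MODIFIER"), ("5_prime_utr_variant", "MODIFIER"),
    ("3_prime_utr_variant", "MODIFIER"), ("upstream_gene_variant", "MODIFIER"),
    ("downstream_gene_variant", "MODIFIER"), ("intergenic_variant", "MODIFIER"),
    ("regulatory_region_variant", "MODIFIER"), ("non_coding_transcript_variant", "MODIFIER"),
    ("coding_sequence_variant", "MODIFIER"), ("mature_mirna_variant", "MODIFIER")] := by decide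

lemma ltH : (LEVEL_TERMS "HIGH" : List String) =
    ["frameshift_variant", "stop_gained", "stop_lost", "start_lost",
     "splice_acceptor_variant", "splice_donor_variant"] := by decide
lemma ltM : (LEVEL_TERMS "MODERATE" : List String) =
    ["missense_variant", "inframe_insertion", "inframe_deletion",
     "protein_altering_variant", "splice_region_variant"] := by decide
lemma ltL : (LEVEL_TERMS "LOW" : List String) = ["synonymous_variant"] := by decide
lemma ltMo : (LEVEL_TERMS "MODIFIER" : List String) =
    ["intron_variant", "5_prime_utr_variant", "3_prime_utr_variant",
     "upstream_gene_variant", "downstream_gene_variant", "intergenic_variant",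
     "regulatory_region_variant", "non_coding_transcript_variant",
     "coding_sequence_variant", "mature_mirna_variant"] := by decide

lemma impactOf_mem (x : String) :
    impactOf x = "OTHER" ∨ (x, impactOf x) ∈ TERM_TO_IMPACT.items := by
  unfold impactOf
  cases hx : TERM_TO_IMPACT.get? x with
  | none => exact Or.inl (PySem.Dict.getD_of_get?_eq_none _ _ hx)
  | some v =>
    right
    rw [PySem.Dict.getD_of_get?_eq_some _ _ hx]
    exact PySem.Dict.mem_items_of_get?_eq_some _ hx

lemma impact_five (t : String) : Five (impactOf t) := by
  unfold Five
  rcases impactOf_mem t with h | h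
  · tauto
  · rw [TTI_items] at h
    simp only [List.mem_cons, Prod.mk.injEq, List.not_mem_nil, or_false] at h
    tauto

lemma mem_imp_high (t : String) (h : t ∈ (LEVEL_TERMS "HIGH" : List String)) :
    impactOf t = "HIGH" := by
  rw [ltH] at h
  simp only [List.mem_cons, List.not_mem_nil, or_false] at h
  rcases h with h | h | h | h | h | h <;> subst h <;> decide

lemma mem_imp_mod (t : String) (h : t ∈ (LEVEL_TERMS "MODERATE" : List String)) :
    impactOf t = "MODERATE" := by
  rw [ltM] at h
  simp only [List.mem_cons, List.not_mem_nil, or_false] at h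
  rcases h with h | h | h | h | h <;> subst h <;> decide

lemma mem_imp_low (t : String) (h : t ∈ (LEVEL_TERMS "LOW" : List String)) :
    impactOf t = "LOW" := by
  rw [ltL] at h
  simp only [List.mem_cons, List.not_mem_nil, or_false] at h
  subst h; decide

lemma mem_imp_modif (t : String) (h : t ∈ (LEVEL_TERMS "MODIFIER" : List String)) :
    impactOf t = "MODIFIER" := by
  rw [ltMo] at h
  simp only [List.mem_cons, List.not_mem_nil, or_false] at h
  rcases h with h | h | h | h | h | h | h | h | h | h <;> subst h <;> decide

lemma imp_mem_high (t : String) (h : impactOf t = "HIGH") :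
    t ∈ (LEVEL_TERMS "HIGH" : List String) := by
  rcases impactOf_mem t with h2 | h2
  · rw [h] at h2; exact absurd h2 (by decide)
  · rw [h, TTI_items] at h2
    rw [ltH]
    simp only [List.mem_cons, Prod.mk.injEq, List.not_mem_nil, or_false] at h2
    simp only [List.mem_cons, List.not_mem_nil, or_false]
    tauto

lemma imp_mem_mod (t : String) (h : impactOf t = "MODERATE") :
    t ∈ (LEVEL_TERMS "MODERATE" : List String) := by
  rcases impactOf_mem t with h2 | h2
  · rw [h] at h2; exact absurd h2 (by decide)
  · rw [h, TTI_items] at h2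
    rw [ltM]
    simp only [List.mem_cons, Prod.mk.injEq, List.not_mem_nil, or_false] at h2
    simp only [List.mem_cons, List.not_mem_nil, or_false]
    tauto

lemma imp_mem_low (t : String) (h : impactOf t = "LOW") :
    t ∈ (LEVEL_TERMS "LOW" : List String) := by
  rcases impactOf_mem t with h2 | h2
  · rw [h] at h2; exact absurd h2 (by decide)
  · rw [h, TTI_items] at h2
    rw [ltL]
    simp only [List.mem_cons, Prod.mk.injEq, List.not_mem_nil, or_false] at h2
    simp only [List.mem_cons, List.not_mem_nil, or_false]
    tauto

lemma imp_mem_modif (t : String) (h : impactOf t = "MODIFIER") :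
    t ∈ (LEVEL_TERMS "MODIFIER" : List String) := by
  rcases impactOf_mem t with h2 | h2
  · rw [h] at h2; exact absurd h2 (by decide)
  · rw [h, TTI_items] at h2
    rw [ltMo]
    simp only [List.mem_cons, Prod.mk.injEq, List.not_mem_nil, or_false] at h2
    simp only [List.mem_cons, List.not_mem_nil, or_false]
    tauto

lemma runMax_cons (t : String) (ts : List String) (r0 : Int) :
    runMax (t :: ts) r0 = runMax ts (max r0 (rk (impactOf t))) := rfl

lemma runMax_lb (ts : List String) (r0 : Int) :
    r0 ≤ runMax ts r0 ∧ ∀ t ∈ ts, rk (impactOf t) ≤ runMax ts r0 :=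
  PySem.List.le_foldl_max_int ts (fun t => rk (impactOf t)) r0

lemma runMax_ub (c : Int) :
    ∀ (ts : List String) (r0 : Int),
      (∀ t ∈ ts, rk (impactOf t) ≤ c) → r0 ≤ c → runMax ts r0 ≤ c
  | [], _, _, h0 => h0
  | t :: ts, r0, h, h0 =>
    runMax_ub c ts _ (fun x hx => h x (List.mem_cons_of_mem _ hx))
      (max_le h0 (h t (List.mem_cons_self ..)))

lemma A_fold (ts : List String) (b : String) (hb : Five b) :
    ts.foldl (fun (st : String × Int) term =>
      let impact := TERM_TO_IMPACT.getD term "OTHER"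
      let rank := IMPACT_RANK.getD impact 0
      if rank > st.2 then (impact, rank) else st) (b, rk b)
    = (invR (runMax ts (rk b)), runMax ts (rk b)) := by
  induction ts generalizing b with
  | nil => rcases hb with h | h | h | h | h <;> subst h <;> decide
  | cons t ts ih =>
    rw [List.foldl_cons, runMax_cons]
    show List.foldl (fun (st : String × Int) term =>
        let impact := TERM_TO_IMPACT.getD term "OTHER"
        let rank := IMPACT_RANK.getD impact 0
        if rank > st.2 then (impact, rank) else st)
      (if rk (impactOf t) > rk b then (impactOf t, rk (impactOf t)) else (b, rk b)) ts
      = (invR (runMax ts (max (rk b) (rk (impactOf t)))), runMax ts (max (rk b) (rk (impactOf t))))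
    by_cases h : rk (impactOf t) > rk b
    · rw [if_pos h, max_eq_right (le_of_lt h)]
      exact ih (impactOf t) (impact_five t)
    · rw [if_neg h, max_eq_left (by omega)]
      exact ih b hb

lemma not_isdisjoint_iff (terms : List String) (lvl : String) :
    (¬ PySem.Set.isdisjoint (PySem.Set.ofList terms) (LEVEL_TERMS lvl) = true)
    ↔ ∃ t ∈ terms, t ∈ (LEVEL_TERMS lvl : List String) := by
  rw [PySem.Set.isdisjoint_iff]
  simp only [not_forall, not_not, exists_prop]
  constructor
  · rintro ⟨x, hx, h2⟩
    exact ⟨x, (PySem.Set.mem_ofList _ _).1 hx, h2⟩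
  · rintro ⟨x, hx, h2⟩
    exact ⟨x, (PySem.Set.mem_ofList _ _).2 hx, h2⟩

lemma rk_le_three (t : String) : rk (impactOf t) ≤ 3 := by
  rcases impact_five t with h | h | h | h | h <;> rw [h] <;> decide

-- ===== VERDICT (by name: the statement is the Claim_ definition above) =====
theorem classify_terms_py_spec : Claim_equal_classify_terms_py := by
  intro terms _
  unfold Spec_classify_terms_py classify_terms_py classify_terms_py_alt
  by_cases hnil : terms = []
  · simp [hnil]
  · rw [if_neg hnil, if_neg hnil]
    show some ((terms.foldl (fun (st : String × Int) term =>
        let impact := TERM_TO_IMPACT.getD term "OTHER"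
        let rank := IMPACT_RANK.getD impact 0
        if rank > st.2 then (impact, rank) else st) ("OTHER", rk "OTHER")).1)
      = some (levelLoop (PySem.Set.ofList terms) ["HIGH", "MODERATE", "LOW", "MODIFIER"])
    rw [A_fold terms "OTHER" (by unfold Five; tauto)]
    have hrk : rk "OTHER" = -1 := by decide
    rw [hrk]
    simp only [levelLoop]
    by_cases hH : ∃ t ∈ terms, t ∈ (LEVEL_TERMS "HIGH" : List String)
    · rw [if_pos ((not_isdisjoint_iff terms "HIGH").2 hH)]
      obtain ⟨t, ht, htl⟩ := hH
      have hge := (runMax_lb terms (-1)).2 t ht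
      rw [mem_imp_high t htl] at hge
      have hle := runMax_ub 3 terms (-1) (fun x _ => rk_le_three x) (by omega)
      rw [show runMax terms (-1) = 3 by
        exact le_antisymm hle (by rw [show rk "HIGH" = 3 by decide] at hge; exact hge)]
      rfl
    · rw [if_neg (fun hc => hH ((not_isdisjoint_iff terms "HIGH").1 hc))]
      by_cases hM : ∃ t ∈ terms, t ∈ (LEVEL_TERMS "MODERATE" : List String)
      · rw [if_pos ((not_isdisjoint_iff terms "MODERATE").2 hM)]
        obtain ⟨t, ht, htl⟩ := hM
        have hge := (runMax_lb terms (-1)).2 t ht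
        rw [mem_imp_mod t htl] at hge
        have hub : ∀ x ∈ terms, rk (impactOf x) ≤ 2 := by
          intro x hx
          rcases impact_five x with h | h | h | h | h
          · exact absurd ⟨x, hx, imp_mem_high x h⟩ hH
          all_goals rw [h]; decide
        have hle := runMax_ub 2 terms (-1) hub (by omega)
        rw [show runMax terms (-1) = 2 by
          exact le_antisymm hle (by rw [show rk "MODERATE" = 2 by decide] at hge; exact hge)]
        rfl
      · rw [if_neg (fun hc => hM ((not_isdisjoint_iff terms "MODERATE").1 hc))]
        by_cases hL : ∃ t ∈ terms, t ∈ (LEVEL_TERMS "LOW" : List String)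
        · rw [if_pos ((not_isdisjoint_iff terms "LOW").2 hL)]
          obtain ⟨t, ht, htl⟩ := hL
          have hge := (runMax_lb terms (-1)).2 t ht
          rw [mem_imp_low t htl] at hge
          have hub : ∀ x ∈ terms, rk (impactOf x) ≤ 1 := by
            intro x hx
            rcases impact_five x with h | h | h | h | h
            · exact absurd ⟨x, hx, imp_mem_high x h⟩ hH
            · exact absurd ⟨x, hx, imp_mem_mod x h⟩ hM
            all_goals rw [h]; decide
          have hle := runMax_ub 1 terms (-1) hub (by omega)
          rw [show runMax terms (-1) = 1 by
            exact le_antisymm hle (by rw [show rk "LOW" = 1 by decide] at hge; exact hge)]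
          rfl
        · rw [if_neg (fun hc => hL ((not_isdisjoint_iff terms "LOW").1 hc))]
          by_cases hMo : ∃ t ∈ terms, t ∈ (LEVEL_TERMS "MODIFIER" : List String)
          · rw [if_pos ((not_isdisjoint_iff terms "MODIFIER").2 hMo)]
            obtain ⟨t, ht, htl⟩ := hMo
            have hge := (runMax_lb terms (-1)).2 t ht
            rw [mem_imp_modif t htl] at hge
            have hub : ∀ x ∈ terms, rk (impactOf x) ≤ 0 := by
              intro x hx
              rcases impact_five x with h | h | h | h | h
              · exact absurd ⟨x, hx, imp_mem_high x h⟩ hH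
              · exact absurd ⟨x, hx, imp_mem_mod x h⟩ hM
              · exact absurd ⟨x, hx, imp_mem_low x h⟩ hL
              all_goals rw [h]; decide
            have hle := runMax_ub 0 terms (-1) hub (by omega)
            rw [show runMax terms (-1) = 0 by
              exact le_antisymm hle (by rw [show rk "MODIFIER" = 0 by decide] at hge; exact hge)]
            rfl
          · rw [if_neg (fun hc => hMo ((not_isdisjoint_iff terms "MODIFIER").1 hc))]
            have hub : ∀ x ∈ terms, rk (impactOf x) ≤ -1 := by
              intro x hx
              rcases impact_five x with h | h | h | h | h
              · exact absurd ⟨x, hx, imp_mem_high x h⟩ hH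
              · exact absurd ⟨x, hx, imp_mem_mod x h⟩ hM
              · exact absurd ⟨x, hx, imp_mem_low x h⟩ hL
              · exact absurd ⟨x, hx, imp_mem_modif x h⟩ hMo
              · rw [h]; decide
            have hle := runMax_ub (-1) terms (-1) hub le_rfl
            rw [show runMax terms (-1) = -1 from
              le_antisymm hle (runMax_lb terms (-1)).1]
            rfl
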